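-- pv_equiv track=rewrite | github.com/qinghui1005/art_check | art_chain.py | walk_ref
-- ===== SOURCE A (Python) =====
-- def ref_text(pfile, cfile):return pfile + '\t' + cfile
--
-- def walk_ref(ref_all, fname, ref_sub):
-- 	if len(ref_sub) == 0:
-- 		yield ref_text(fname, '')
-- 	else:
-- 		for ref in ref_sub:
-- 			if ref in ref_all:
-- 				for text in walk_ref(ref_all, ref_text(fname, ref), ref_all[ref]):yield text
-- 			else:
-- 				yield ref_text(fname, ref)
-- ===== SOURCE B (Python) =====
-- def ref_text(pfile, cfile):
--     return pfile + '\t' + cfile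
--
--
-- def walk_ref(ref_all, fname, ref_sub):
--     # Iterative DFS with an explicit stack of work items instead of recursion.
--     # An item is either a ready string (yield it) or a (prefix, refs) frame.
--     stack = [(fname, ref_sub)]
--     while stack:
--         item = stack.pop()
--         if isinstance(item, str):
--             yield item
--         else:
--             prefix, refs = item
--             if not refs:
--                 yield ref_text(prefix, '')
--             else:
--                 for ref in reversed(refs):
--                     if ref in ref_all:
--                         stack.append((ref_text(prefix, ref), ref_all[ref]))
--                     else:
--                         stack.append(ref_text(prefix, ref))
-- ===== Notes on version B (the rewrite author's own statement) =====
-- stated objective: alternative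
-- what changed: The recursive generator is replaced by an iterative generator driven by an explicit stack of work items (ready strings and (prefix, refs) frames), pushing a frame's children in reverse so popping reproduces A's pre-order yield sequence without recursion.
import Mathlib
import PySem

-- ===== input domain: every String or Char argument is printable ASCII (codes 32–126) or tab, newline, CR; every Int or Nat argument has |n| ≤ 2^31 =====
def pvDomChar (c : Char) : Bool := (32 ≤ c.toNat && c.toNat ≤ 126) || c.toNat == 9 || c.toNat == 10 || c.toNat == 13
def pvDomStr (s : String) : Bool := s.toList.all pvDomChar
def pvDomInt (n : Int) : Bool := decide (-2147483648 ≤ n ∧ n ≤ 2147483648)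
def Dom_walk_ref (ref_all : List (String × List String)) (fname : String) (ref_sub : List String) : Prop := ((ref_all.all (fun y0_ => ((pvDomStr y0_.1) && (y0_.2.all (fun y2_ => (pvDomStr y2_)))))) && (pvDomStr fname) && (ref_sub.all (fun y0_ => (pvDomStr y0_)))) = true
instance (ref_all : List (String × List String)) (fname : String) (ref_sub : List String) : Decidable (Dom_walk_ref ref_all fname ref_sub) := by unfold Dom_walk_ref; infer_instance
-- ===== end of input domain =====

-- B replaces A's recursive generator by an explicit-stack iterative generator (different decomposition;
-- same cost). Both ports use fuel only as a totality guard; the ports agree on ALL inputs, and Pre_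
-- excludes exactly the cyclic reference graphs on which the Python A (and B) never returns.

-- ===== PORT A =====
def ref_text (pfile cfile : String) : String := pfile ++ "\t" ++ cfile

-- fuel-guarded transliteration of A's recursion; fuel ref_all.length+1 suffices whenever the
-- Python terminates (on an acyclic reference graph the key-path depth is ≤ number of keys)
def walkA (ref_all : List (String × List String)) : Nat → String → List String → List String
  | 0, _, _ => []
  | f+1, fname, ref_sub =>
    if ref_sub = [] then [ref_text fname ""]
    else ref_sub.foldl (fun acc ref =>
      acc ++ (match ref_all.lookup ref with          -- 'if ref in ref_all: … ref_all[ref]' (first match)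
        | some subs => walkA ref_all f (ref_text fname ref) subs
        | none => [ref_text fname ref])) []

def walk_ref (ref_all : List (String × List String)) (fname : String) (ref_sub : List String) : List String :=
  walkA ref_all (ref_all.length + 1) fname ref_sub

-- ===== PORT B =====
-- a work item of Source B's stack: a ready string to yield, or a (prefix, refs) frame
-- (frames carry the same totality fuel as walkA so truncation, never reached on Pre_, matches)
inductive WItem where
  | ready : String → WItem
  | frame : Nat → String → List String → WItem
deriving DecidableEq, Repr

def mkItem (ref_all : List (String × List String)) (f : Nat) (prefix_ ref : String) : WItem :=
  match ref_all.lookup ref with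
  | some subs => .frame f (ref_text prefix_ ref) subs
  | none => .ready (ref_text prefix_ ref)

-- the while loop over the stack (head = top); pushing children in reversed order then popping
-- one by one is, in list form, prepending the in-order mapped children
def loopB (ref_all : List (String × List String)) : Nat → List WItem → List String
  | 0, _ => []
  | _+1, [] => []
  | g+1, .ready s :: rest => s :: loopB ref_all g rest
  | g+1, .frame 0 _ _ :: rest => loopB ref_all g rest
  | g+1, .frame (f+1) prefix_ refs :: rest =>
    if refs = [] then ref_text prefix_ "" :: loopB ref_all g rest
    else loopB ref_all g (refs.map (mkItem ref_all f prefix_) ++ rest)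

-- longest value list in ref_all (for the outer fuel bound only)
def wrMaxLen (ref_all : List (String × List String)) : Nat :=
  (ref_all.map (fun p => p.2.length)).foldr max 0

def walk_ref_alt (ref_all : List (String × List String)) (fname : String) (ref_sub : List String) : List String :=
  loopB ref_all ((ref_sub.length + 1) * (wrMaxLen ref_all + 2) ^ (ref_all.length + 2))
    [.frame (ref_all.length + 1) fname ref_sub]

-- ===== PRECONDITION & SPEC =====
-- Pre_ is a property of the input's reference GRAPH only (which names can reach which), not of
-- either port's computation (those build tab-joined path strings; nothing here does).
-- wrReach m S = the names reachable from S along at most m reference edges; m = ref_all.length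
-- saturates, since any longer walk must already repeat a key. (A subset-based acyclicity formula
-- would be exponential to check; this closure is the polynomial statement of the same condition.)
def wrSuccs (ref_all : List (String × List String)) (r : String) : List String :=
  (ref_all.lookup r).getD []
def wrGrow (ref_all : List (String × List String)) (S : List String) : List String :=
  (S ++ S.flatMap (wrSuccs ref_all)).dedup
def wrReach (ref_all : List (String × List String)) : Nat → List String → List String
  | 0, S => S
  | m+1, S => wrReach ref_all m (wrGrow ref_all S)

-- Pre_ excludes exactly the inputs on which the Python A never returns (RecursionError): those whose
-- reference graph has a key reachable from ref_sub that lies on a cycle (k reachable from its own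
-- successors). On every other input A returns, and the claim covers it.
def Pre_walk_ref (ref_all : List (String × List String)) (fname : String) (ref_sub : List String) : Prop :=
  ∀ k ∈ wrReach ref_all ref_all.length ref_sub,
    k ∉ wrReach ref_all ref_all.length (wrSuccs ref_all k)
instance (ref_all : List (String × List String)) (fname : String) (ref_sub : List String) : Decidable (Pre_walk_ref ref_all fname ref_sub) := by unfold Pre_walk_ref; infer_instance

def pvWitness_walk_ref : (List (String × List String)) × String × List String :=
  ([("a", ["b", "z"]), ("b", [])], "f", ["a", "c"])

def Spec_walk_ref (ref_all : List (String × List String)) (fname : String) (ref_sub : List String) (out : List String) : Prop := out = walk_ref_alt ref_all fname ref_sub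
instance (ref_all : List (String × List String)) (fname : String) (ref_sub : List String) (out : List String) : Decidable (Spec_walk_ref ref_all fname ref_sub out) := by unfold Spec_walk_ref; infer_instance

-- ===== CLAIM (what is proved, stated in full; the proofs are below) =====
def Claim_equal_walk_ref : Prop := ∀ (ref_all : List (String × List String)) (fname : String) (ref_sub : List String), Dom_walk_ref ref_all fname ref_sub → Pre_walk_ref ref_all fname ref_sub → Spec_walk_ref ref_all fname ref_sub (walk_ref ref_all fname ref_sub)

-- ===== LEMMAS AND PROOFS =====

-- weight of a work item: an upper bound on the loop iterations it can cause
def wrW (K : Nat) : WItem → Nat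
  | .ready _ => 1
  | .frame f _ refs => (refs.length + 1) * (K + 2) ^ f

def wrMu (K : Nat) (st : List WItem) : Nat := (st.map (wrW K)).sum

-- denotation of a work item: the strings it will yield (frames denote walkA's output)
def wrDen (ref_all : List (String × List String)) : WItem → List String
  | .ready s => [s]
  | .frame f a b => walkA ref_all f a b

theorem wrW_pos (K : Nat) (it : WItem) : 0 < wrW K it := by
  cases it with
  | ready s => simp [wrW]
  | frame f a b => unfold wrW; positivity

theorem lookup_len (ref_all : List (String × List String)) (r : String) (subs : List String)
    (h : ref_all.lookup r = some subs) : subs.length ≤ wrMaxLen ref_all := by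
  induction ref_all with
  | nil => simp [List.lookup] at h
  | cons p rest ih =>
    obtain ⟨k, v⟩ := p
    cases hk : r == k with
    | true =>
      simp [List.lookup, hk] at h
      subst h
      simp [wrMaxLen]
    | false =>
      simp [List.lookup, hk] at h
      have := ih h
      simp [wrMaxLen] at this ⊢
      omega

theorem mk_w_le (ref_all : List (String × List String)) (f : Nat) (prefix_ ref : String) :
    wrW (wrMaxLen ref_all) (mkItem ref_all f prefix_ ref)
      ≤ (wrMaxLen ref_all + 1) * (wrMaxLen ref_all + 2) ^ f := by
  unfold mkItem
  cases h : ref_all.lookup ref with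
  | none =>
    simp [wrW]
    have : 0 < (wrMaxLen ref_all + 1) * (wrMaxLen ref_all + 2) ^ f := by positivity
    omega
  | some subs =>
    simp [wrW]
    have := lookup_len ref_all ref subs h
    exact this

theorem mu_map_le (ref_all : List (String × List String)) (f : Nat) (prefix_ : String)
    (refs : List String) :
    wrMu (wrMaxLen ref_all) (refs.map (mkItem ref_all f prefix_))
      ≤ refs.length * ((wrMaxLen ref_all + 1) * (wrMaxLen ref_all + 2) ^ f) := by
  induction refs with
  | nil => simp [wrMu]
  | cons r rs ih =>
    simp only [List.map_cons, wrMu, List.map, List.sum_cons, List.length_cons]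
    have h1 := mk_w_le ref_all f prefix_ r
    have h2 : wrMu (wrMaxLen ref_all) (rs.map (mkItem ref_all f prefix_))
        ≤ rs.length * ((wrMaxLen ref_all + 1) * (wrMaxLen ref_all + 2) ^ f) := ih
    simp only [wrMu] at h2
    calc wrW (wrMaxLen ref_all) (mkItem ref_all f prefix_ r)
          + ((rs.map (mkItem ref_all f prefix_)).map (wrW (wrMaxLen ref_all))).sum
        ≤ (wrMaxLen ref_all + 1) * (wrMaxLen ref_all + 2) ^ f
          + rs.length * ((wrMaxLen ref_all + 1) * (wrMaxLen ref_all + 2) ^ f) := by omega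
      _ = (rs.length + 1) * ((wrMaxLen ref_all + 1) * (wrMaxLen ref_all + 2) ^ f) := by ring
      _ = rs.length.succ * ((wrMaxLen ref_all + 1) * (wrMaxLen ref_all + 2) ^ f) := by rfl

theorem wrMu_append (K : Nat) (xs ys : List WItem) :
    wrMu K (xs ++ ys) = wrMu K xs + wrMu K ys := by
  simp [wrMu]

-- walkA on a nonempty list is the flatMap of the denotations of the work items B creates from it
theorem walkA_flatMap (ref_all : List (String × List String)) (f : Nat) (fname : String)
    (refs : List String) (hne : refs ≠ []) :
    walkA ref_all (f + 1) fname refs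
      = (refs.map (mkItem ref_all f fname)).flatMap (wrDen ref_all) := by
  rw [walkA]
  simp only [if_neg hne]
  have : (fun (acc : List String) (ref : String) =>
      acc ++ (match ref_all.lookup ref with
        | some subs => walkA ref_all f (ref_text fname ref) subs
        | none => [ref_text fname ref]))
      = fun acc ref => acc ++ wrDen ref_all (mkItem ref_all f fname ref) := by
    funext acc ref
    unfold mkItem
    cases h : ref_all.lookup ref <;> simp [wrDen]
  rw [this, PySem.List.foldl_append_eq_flatMap]
  simp [List.flatMap_map]

-- main invariant: with enough outer fuel the stack loop yields the concatenated denotations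
theorem loopB_den (ref_all : List (String × List String)) :
    ∀ (g : Nat) (st : List WItem), wrMu (wrMaxLen ref_all) st ≤ g →
      loopB ref_all g st = st.flatMap (wrDen ref_all) := by
  intro g
  induction g with
  | zero =>
    intro st h
    cases st with
    | nil => simp [loopB]
    | cons it rest =>
      exfalso
      have := wrW_pos (wrMaxLen ref_all) it
      simp [wrMu] at h
      omega
  | succ g ih =>
    intro st h
    cases st with
    | nil => simp [loopB]
    | cons it rest =>
      cases it with
      | ready s =>
        rw [loopB]
        have hr : wrMu (wrMaxLen ref_all) rest ≤ g := by
          simp [wrMu, wrW] at h ⊢; omega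
        rw [ih rest hr]
        simp [wrDen]
      | frame f prefix_ refs =>
        cases f with
        | zero =>
          rw [loopB]
          have hr : wrMu (wrMaxLen ref_all) rest ≤ g := by
            have := wrW_pos (wrMaxLen ref_all) (.frame 0 prefix_ refs)
            simp [wrMu] at h ⊢; omega
          rw [ih rest hr]
          simp [wrDen, walkA]
        | succ f =>
          rw [loopB]
          by_cases hne : refs = []
          · subst hne
            have hr : wrMu (wrMaxLen ref_all) rest ≤ g := by
              have := wrW_pos (wrMaxLen ref_all) (.frame (f+1) prefix_ [])
              simp [wrMu] at h ⊢; omega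
            rw [ih rest hr]
            simp [wrDen, walkA]
          · simp only [if_neg hne]
            have hmap := mu_map_le ref_all f prefix_ refs
            have hpow : 0 < (wrMaxLen ref_all + 2) ^ f := by positivity
            have hstep : wrMu (wrMaxLen ref_all) (refs.map (mkItem ref_all f prefix_)) + 1
                ≤ (refs.length + 1) * (wrMaxLen ref_all + 2) ^ (f + 1) := by
              have hx : refs.length * ((wrMaxLen ref_all + 1) * (wrMaxLen ref_all + 2) ^ f) + 1
                  ≤ (refs.length + 1) * ((wrMaxLen ref_all + 2) * (wrMaxLen ref_all + 2) ^ f) := by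
                nlinarith
              calc wrMu (wrMaxLen ref_all) (refs.map (mkItem ref_all f prefix_)) + 1
                  ≤ refs.length * ((wrMaxLen ref_all + 1) * (wrMaxLen ref_all + 2) ^ f) + 1 := by
                    omega
                _ ≤ (refs.length + 1) * ((wrMaxLen ref_all + 2) * (wrMaxLen ref_all + 2) ^ f) := hx
                _ = (refs.length + 1) * (wrMaxLen ref_all + 2) ^ (f + 1) := by ring
            have hmu : wrMu (wrMaxLen ref_all) (refs.map (mkItem ref_all f prefix_) ++ rest) ≤ g := by
              rw [wrMu_append]
              simp only [wrMu, List.map_cons, List.sum_cons, wrW] at h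
              have hrest : wrMu (wrMaxLen ref_all) rest = (rest.map (wrW (wrMaxLen ref_all))).sum := rfl
              omega
            rw [ih _ hmu]
            rw [List.flatMap_append]
            rw [List.flatMap_cons]
            congr 1
            exact (walkA_flatMap ref_all f prefix_ refs hne).symm

-- total equality of the two ports (fuel truncation points coincide by construction)
theorem ports_eq (ref_all : List (String × List String)) (fname : String) (ref_sub : List String) :
    walk_ref ref_all fname ref_sub = walk_ref_alt ref_all fname ref_sub := by
  unfold walk_ref walk_ref_alt
  rw [loopB_den]
  · simp [wrDen]
  · simp only [wrMu, List.map, List.sum_cons, List.sum_nil, wrW]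
    have hle : (wrMaxLen ref_all + 2) ^ (ref_all.length + 1)
        ≤ (wrMaxLen ref_all + 2) ^ (ref_all.length + 2) :=
      Nat.pow_le_pow_right (by omega) (by omega)
    have := Nat.mul_le_mul_left (ref_sub.length + 1) hle
    omega

-- ===== VERDICT (by name: the statement is the Claim_ definition above) =====
theorem walk_ref_spec : Claim_equal_walk_ref := by
  intro ref_all fname ref_sub _ _
  unfold Spec_walk_ref
  exact ports_eq ref_all fname ref_sub
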